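-- pv_equiv track=rewrite | github.com/spartachesko/python_portfolio | lesson_014/bowling.py | market_global
-- ===== SOURCE A (Python) =====
-- def market_global(list_for_calculating):
--     # правило подсчета очков для внешнего рынка
--     result_score = 0
--     value_last = 0
--     value = 0
--     list_for_calculating = list(reversed(list_for_calculating))
--     for frame in list_for_calculating:
--
--         value_last_last_last = value_last
--         value_last_last = value
--
--         if frame[0] == 'X':
--             result_score += 10
--             result_score += int(value) + int(value_last_last_last)
--             value_last = value
--             value = 10
--
--         elif frame[1] == '/':
--             result_score += 10
--             value_last = 0  # /
--             value = int(frame[0])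
--             result_score += value_last_last
--
--         else:
--
--             result_score += int(frame[0]) + int(frame[1])
--             value_last = int(frame[1])
--             value = int(frame[0])
--
--     return result_score
-- ===== SOURCE B (Python) =====
-- def market_global(list_for_calculating):
--     # Forward recursion over the original frame order with lookahead helpers,
--     # instead of A's reversed fold with carried state.
--     def first_ball(frames):
--         if not frames:
--             return 0
--         f = frames[0]
--         return 10 if f[0] == 'X' else int(f[0])
--
--     def second_part(frames):
--         if not frames:
--             return 0
--         f = frames[0]
--         if f[0] == 'X':
--             return first_ball(frames[1:])
--         if f[1] == '/':
--             return 0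
--         return int(f[1])
--
--     def go(frames):
--         if not frames:
--             return 0
--         f, rest = frames[0], frames[1:]
--         if f[0] == 'X':
--             contrib = 10 + first_ball(rest) + second_part(rest)
--         elif f[1] == '/':
--             contrib = 10 + first_ball(rest)
--         else:
--             contrib = int(f[0]) + int(f[1])
--         return contrib + go(rest)
--
--     return go(list_for_calculating)
-- ===== Notes on version B (the rewrite author's own statement) =====
-- stated objective: alternative
-- what changed: Replaced A's backward pass (a fold over the reversed list carrying last/second-to-last ball state) with a forward recursion over the original frame order using lookahead helpers first_ball/second_part on the remaining frames.
import Mathlib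
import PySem

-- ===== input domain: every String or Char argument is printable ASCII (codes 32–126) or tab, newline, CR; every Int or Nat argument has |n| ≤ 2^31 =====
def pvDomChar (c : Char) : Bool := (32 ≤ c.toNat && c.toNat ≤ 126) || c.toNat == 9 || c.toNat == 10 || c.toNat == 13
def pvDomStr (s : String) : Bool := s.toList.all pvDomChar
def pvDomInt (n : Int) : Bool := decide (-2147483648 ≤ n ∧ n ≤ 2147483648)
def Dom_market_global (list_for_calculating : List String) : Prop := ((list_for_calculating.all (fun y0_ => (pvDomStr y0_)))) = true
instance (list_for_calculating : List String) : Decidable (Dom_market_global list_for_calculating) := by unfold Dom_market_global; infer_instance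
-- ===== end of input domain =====

-- B replaces A's reversed fold with carried state by a forward recursion with lookahead helpers (alternative decomposition, same cost).


-- shared Python primitives: frame[i] (default irrelevant: Pre_ excludes the raising inputs) and int(one-char string)
def pvCh (f : String) (i : Int) : Char := (PySem.Str.pyGet? f i).getD ' '
def pvInt (c : Char) : Int := (PySem.Int.ofStr? (String.mk [c])).getD 0

-- ===== PORT A =====
-- state (result_score, value_last, value), folded over the reversed list as in A
def marketStep (st : Int × Int × Int) (frame : String) : Int × Int × Int :=
  let result := st.1
  let value_last := st.2.1
  let value := st.2.2
  let value_last_last_last := value_last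
  let value_last_last := value
  if pvCh frame 0 = 'X' then
    (result + 10 + value + value_last_last_last, value, 10)
  else if pvCh frame 1 = '/' then
    (result + 10 + value_last_last, 0, pvInt (pvCh frame 0))
  else
    (result + pvInt (pvCh frame 0) + pvInt (pvCh frame 1), pvInt (pvCh frame 1), pvInt (pvCh frame 0))

def market_global (list_for_calculating : List String) : Int :=
  ((list_for_calculating.reverse).foldl marketStep (0, 0, 0)).1

-- ===== PORT B =====
def firstBall : List String → Int
  | [] => 0
  | f :: _ => if pvCh f 0 = 'X' then 10 else pvInt (pvCh f 0)

def secondPart : List String → Int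
  | [] => 0
  | f :: rest =>
    if pvCh f 0 = 'X' then firstBall rest
    else if pvCh f 1 = '/' then 0
    else pvInt (pvCh f 1)

def goMarket : List String → Int
  | [] => 0
  | f :: rest =>
    (if pvCh f 0 = 'X' then 10 + firstBall rest + secondPart rest
     else if pvCh f 1 = '/' then 10 + firstBall rest
     else pvInt (pvCh f 0) + pvInt (pvCh f 1)) + goMarket rest

def market_global_alt (list_for_calculating : List String) : Int :=
  goMarket list_for_calculating

-- ===== PRECONDITION & SPEC =====
-- Pre_ excludes exactly the inputs where the Python A raises: a frame that is empty, a
-- non-strike frame of length 1 (IndexError), or a non-strike frame whose first char is not a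
-- digit, or whose second char is neither '/' nor a digit (ValueError from int()).
def frameOK (f : String) : Bool :=
  match f.toList with
  | [] => false
  | c0 :: rest =>
    if c0 = 'X' then true
    else match rest with
      | [] => false
      | c1 :: _ => c0.isDigit && (c1 = '/' || c1.isDigit)

def Pre_market_global (list_for_calculating : List String) : Prop :=
  ∀ f ∈ list_for_calculating, frameOK f = true
instance (list_for_calculating : List String) : Decidable (Pre_market_global list_for_calculating) := by unfold Pre_market_global; infer_instance

def pvWitness_market_global : List String := ["X", "3/", "45"]

def Spec_market_global (list_for_calculating : List String) (out : Int) : Prop := out = market_global_alt list_for_calculating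
instance (list_for_calculating : List String) (out : Int) : Decidable (Spec_market_global list_for_calculating out) := by unfold Spec_market_global; infer_instance

-- ===== CLAIM (what is proved, stated in full; the proofs are below) =====
def Claim_equal_market_global : Prop := ∀ (list_for_calculating : List String), Dom_market_global list_for_calculating → Pre_market_global list_for_calculating → Spec_market_global list_for_calculating (market_global list_for_calculating)

-- ===== LEMMAS AND PROOFS =====

-- invariant of A's reversed fold: its full state is B's (score, second part, first ball)
theorem market_fold_inv (l : List String) :
    (l.reverse).foldl marketStep (0, 0, 0) = (goMarket l, secondPart l, firstBall l) := by
  rw [List.foldl_reverse]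
  induction l with
  | nil => simp [goMarket, secondPart, firstBall]
  | cons f rest ih =>
    simp only [List.foldr_cons]
    rw [ih]
    by_cases h0 : pvCh f 0 = 'X'
    · simp [marketStep, goMarket, secondPart, firstBall, h0, Prod.ext_iff]
      omega
    · by_cases h1 : pvCh f 1 = '/'
      · simp [marketStep, goMarket, secondPart, firstBall, h0, h1, Prod.ext_iff]
        omega
      · simp [marketStep, goMarket, secondPart, firstBall, h0, h1, Prod.ext_iff]
        omega

-- ===== VERDICT (by name: the statement is the Claim_ definition above) =====
theorem market_global_spec : Claim_equal_market_global := by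
  intro l _ _
  unfold Spec_market_global market_global market_global_alt
  rw [market_fold_inv]
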